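-- pv_equiv track=rewrite | github.com/MrBrantCode/unitest_baseline | mut_generate/mist_train_cf/cf_59148/solution.py | replace_primes_with_cubes
-- ===== SOURCE A (Python) =====
-- def replace_primes_with_cubes(nums):
--     def is_prime(num):
--         if num <= 1:
--             return False
--
--         for i in range(2, num):
--             if num % i == 0:
--                 return False
--         return True
--
--     return [num ** 3 if is_prime(num) else num for num in nums]
-- ===== SOURCE B (Python) =====
-- def replace_primes_with_cubes(nums):
--     if not nums:
--         return []
--     m = max(nums)
--     r = 1
--     while (r + 1) * (r + 1) <= m:
--         r += 1
--     sieve = [i >= 2 for i in range(r + 1)]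
--     for i in range(2, r + 1):
--         for j in range(i * i, r + 1, i):
--             sieve[j] = False
--     primes = [i for i in range(2, r + 1) if sieve[i]]
--
--     def is_p(n):
--         if n < 2:
--             return False
--         for p in primes:
--             if p * p > n:
--                 return True
--             if n % p == 0:
--                 return False
--         return True
--
--     return [n ** 3 if is_p(n) else n for n in nums]
-- ===== Notes on version B (the rewrite author's own statement) =====
-- stated objective: faster
-- what changed: B builds one sieve-of-Eratosthenes table of the primes up to isqrt(max(nums)) and tests each element by trial division by those precomputed primes only (stopping at p*p > n), instead of A's per-element trial division over the whole of range(2, num).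
import Mathlib
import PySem

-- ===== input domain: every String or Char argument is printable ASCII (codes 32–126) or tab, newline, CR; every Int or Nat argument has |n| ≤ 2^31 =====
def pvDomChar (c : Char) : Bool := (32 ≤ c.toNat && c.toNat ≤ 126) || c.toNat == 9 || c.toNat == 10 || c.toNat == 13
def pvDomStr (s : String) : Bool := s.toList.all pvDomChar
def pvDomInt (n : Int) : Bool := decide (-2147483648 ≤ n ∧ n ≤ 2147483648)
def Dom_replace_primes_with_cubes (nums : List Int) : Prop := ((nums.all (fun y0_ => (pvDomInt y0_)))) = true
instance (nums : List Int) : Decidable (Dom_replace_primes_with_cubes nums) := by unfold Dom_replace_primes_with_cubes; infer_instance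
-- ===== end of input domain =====

-- B replaces A's per-element trial division over range(2, num) by one sieve of
-- Eratosthenes up to isqrt(max(nums)) and trial division by those primes only.

-- ===== PORT A =====
-- A's 'for i in range(2, num): if num % i == 0: return False' with its early
-- return, as index recursion; fuel only bounds the iteration count (≤ num-2)
def pvIsPrimeLoopA (num : Int) : Nat → Int → Bool
  | fuel, i =>
    if i < num then
      match fuel with
      | 0 => true
      | fuel + 1 => if PySem.Int.mod num i == 0 then false else pvIsPrimeLoopA num fuel (i + 1)
    else true

-- inner helper is_prime
def pvIsPrimeA (num : Int) : Bool :=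
  if num ≤ 1 then false
  else pvIsPrimeLoopA num (num - 2).toNat 2

def replace_primes_with_cubes (nums : List Int) : List Int :=
  nums.map (fun num => if pvIsPrimeA num then num ^ 3 else num)

-- ===== PORT B =====
-- 'r = 1; while (r+1)*(r+1) <= m: r += 1'; fuel only bounds the iteration count (≤ m)
def pvISqrt (m : Int) : Nat → Int → Int
  | 0, r => r
  | fuel + 1, r => if (r + 1) * (r + 1) ≤ m then pvISqrt m fuel (r + 1) else r

-- 'sieve = [i >= 2 for i in range(r + 1)]'
def pvSieveInit (r : Int) : List Bool :=
  (PySem.List.pyRange 0 (r + 1) 1).map (fun i => decide (2 ≤ i))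

-- 'for i in range(2, r+1): for j in range(i*i, r+1, i): sieve[j] = False'
def pvSieve (r : Int) : List Bool :=
  (PySem.List.pyRange 2 (r + 1) 1).foldl
    (fun s i => (PySem.List.pyRange (i * i) (r + 1) i).foldl (fun s j => s.set j.toNat false) s)
    (pvSieveInit r)

-- 'for p in primes: if p*p > n: return True; if n % p == 0: return False' with early returns
def pvCheckPrimes (n : Int) : List Int → Bool
  | [] => true
  | p :: ps =>
    if n < p * p then true
    else if PySem.Int.mod n p == 0 then false
    else pvCheckPrimes n ps

-- inner helper is_p
def pvIsP (primes : List Int) (n : Int) : Bool :=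
  if n < 2 then false else pvCheckPrimes n primes

def replace_primes_with_cubes_alt (nums : List Int) : List Int :=
  match PySem.List.max? nums (fun x => x) with
  | none => []     -- 'if not nums: return []'
  | some m =>
    let r := pvISqrt m m.toNat 1
    let sieve := pvSieve r
    -- 'primes = [i for i in range(2, r + 1) if sieve[i]]'
    let primes := (PySem.List.pyRange 2 (r + 1) 1).filter
        (fun i => (PySem.List.pyGet? sieve i).getD false)
    nums.map (fun n => if pvIsP primes n then n ^ 3 else n)

-- ===== PRECONDITION & SPEC =====
def Spec_replace_primes_with_cubes (nums : List Int) (out : List Int) : Prop := out = replace_primes_with_cubes_alt nums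
instance (nums : List Int) (out : List Int) : Decidable (Spec_replace_primes_with_cubes nums out) := by unfold Spec_replace_primes_with_cubes; infer_instance

-- ===== CLAIM (what is proved, stated in full; the proofs are below) =====
def Claim_equal_replace_primes_with_cubes : Prop := ∀ (nums : List Int), Dom_replace_primes_with_cubes nums → Spec_replace_primes_with_cubes nums (replace_primes_with_cubes nums)

-- ===== LEMMAS AND PROOFS =====

-- the positions marked False by the sieve loops, as one flat list of indices
def pvMarks (r : Int) : List Int :=
  (PySem.List.pyRange 2 (r + 1) 1).flatMap (fun i => PySem.List.pyRange (i * i) (r + 1) i)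

theorem pvSieve_eq_fold (r : Int) :
    pvSieve r = (pvMarks r).foldl (fun s j => s.set j.toNat false) (pvSieveInit r) := by
  unfold pvSieve pvMarks
  rw [List.foldl_flatMap]

-- folding 'set index to false' over a list of indices, read back pointwise
theorem pvSetFold_getElem? (js : List Int) (s : List Bool) (k : Nat) :
    (js.foldl (fun s j => s.set j.toNat false) s)[k]? =
      if k ∈ js.map Int.toNat then s[k]?.map (fun _ => false) else s[k]? := by
  induction js generalizing s with
  | nil => simp
  | cons j t ih =>
      simp only [List.foldl_cons, ih, List.map_cons, List.mem_cons]
      have hset : (s.set j.toNat false)[k]? =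
          if j.toNat = k then s[k]?.map (fun _ => false) else s[k]? := by
        rw [List.getElem?_set]
        by_cases hjk : j.toNat = k
        · subst hjk
          by_cases hl : j.toNat < s.length
          · simp [hl]
          · simp [hl]
        · simp [hjk]
      rw [hset]
      by_cases hjk : k = j.toNat
      · rw [if_pos (Or.inl hjk), if_pos hjk.symm]
        by_cases ht : k ∈ t.map Int.toNat
        · rw [if_pos ht]; cases s[k]? <;> rfl
        · rw [if_neg ht]
      · rw [if_neg (Ne.symm hjk)]
        by_cases ht : k ∈ t.map Int.toNat
        · rw [if_pos ht, if_pos (Or.inr ht)]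
        · rw [if_neg ht, if_neg (by tauto)]

-- i (with 2 ≤ i ≤ r) is marked by the sieve iff it has a divisor d with 2 ≤ d, d*d ≤ i
theorem pvMarked_iff (r i : Int) (h2 : 2 ≤ i) (hr : i ≤ r) :
    (i.toNat ∈ (pvMarks r).map Int.toNat) ↔ ∃ d : Int, 2 ≤ d ∧ d * d ≤ i ∧ d ∣ i := by
  simp only [pvMarks, List.mem_map, List.mem_flatMap]
  constructor
  · rintro ⟨j, ⟨d, hd, hj⟩, hjk⟩
    rw [PySem.List.mem_pyRange_one] at hd
    rw [PySem.List.mem_pyRange_iff_of_pos (by omega : (0:Int) < d)] at hj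
    obtain ⟨hjd, hjr, hdvd⟩ := hj
    have hj0 : 0 ≤ j := by nlinarith
    have hji : j = i := by omega
    subst hji
    refine ⟨d, hd.1, hjd, ?_⟩
    have : d ∣ (j - d * d) + d * d := dvd_add hdvd (dvd_mul_left d d)
    simpa using this
  · rintro ⟨d, h2d, hdd, hdvd⟩
    have hdr : d ≤ r := by nlinarith
    refine ⟨i, ⟨d, ?_, ?_⟩, rfl⟩
    · rw [PySem.List.mem_pyRange_one]; omega
    · rw [PySem.List.mem_pyRange_iff_of_pos (by omega : (0:Int) < d)]
      exact ⟨hdd, by omega, dvd_sub hdvd (dvd_mul_left d d)⟩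

-- the initial sieve at index k < r+1 reads decide (2 ≤ k)
theorem pvSieveInit_getElem? (r : Int) (k : Nat) (hk : (k : Int) < r + 1) :
    (pvSieveInit r)[k]? = some (decide (2 ≤ (k : Int))) := by
  unfold pvSieveInit
  have hb : (r + 1) = (((r + 1).toNat : Nat) : Int) := by omega
  rw [hb, PySem.List.getElem?_map_pyRange_zero _ _ k (by omega)]

-- the finished sieve at a position 2 ≤ i ≤ r is True iff i has no small divisor
theorem pvSieve_getD (r i : Int) (h2 : 2 ≤ i) (hr : i ≤ r) :
    (((pvSieve r)[i.toNat]?).getD false = true) ↔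
      ∀ d : Int, 2 ≤ d → d * d ≤ i → ¬ (d ∣ i) := by
  rw [pvSieve_eq_fold, pvSetFold_getElem?, pvSieveInit_getElem? r i.toNat (by omega)]
  by_cases hmk : i.toNat ∈ (pvMarks r).map Int.toNat
  · rw [if_pos hmk]
    simp only [Option.map_some, Option.getD_some]
    obtain ⟨d, h2d, hdd, hdvd⟩ := (pvMarked_iff r i h2 hr).mp hmk
    exact iff_of_false (by simp) (fun h => h d h2d hdd hdvd)
  · rw [if_neg hmk]
    simp only [Option.getD_some]
    refine iff_of_true (by simp; omega) ?_
    intro d h2d hdd hdvd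
    exact hmk ((pvMarked_iff r i h2 hr).mpr ⟨d, h2d, hdd, hdvd⟩)

-- the isqrt while-loop: its result r satisfies r*r ≤ m < (r+1)*(r+1) (given enough fuel)
theorem pvISqrt_spec (m : Int) (fuel : Nat) :
    ∀ r : Int, 1 ≤ r → r * r ≤ m → (m - r).toNat ≤ fuel →
      1 ≤ pvISqrt m fuel r ∧ (pvISqrt m fuel r) * (pvISqrt m fuel r) ≤ m ∧
        m < (pvISqrt m fuel r + 1) * (pvISqrt m fuel r + 1) := by
  induction fuel with
  | zero =>
      intro r h1 hrr hfuel
      have hmr : m ≤ r := by omega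
      rw [pvISqrt]
      exact ⟨h1, hrr, by nlinarith⟩
  | succ fuel ih =>
      intro r h1 hrr hfuel
      rw [pvISqrt]
      by_cases hc : (r + 1) * (r + 1) ≤ m
      · rw [if_pos hc]
        have hr1m : r + 1 ≤ m := by nlinarith
        exact ih (r + 1) (by omega) hc (by omega)
      · rw [if_neg hc]
        exact ⟨h1, hrr, by omega⟩

-- membership in 'primes = [i for i in range(2, r+1) if sieve[i]]'
theorem pvPrimes_mem (r p : Int) :
    (p ∈ (PySem.List.pyRange 2 (r + 1) 1).filter
        (fun i => (PySem.List.pyGet? (pvSieve r) i).getD false)) ↔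
      (2 ≤ p ∧ p ≤ r ∧ ∀ d : Int, 2 ≤ d → d * d ≤ p → ¬ (d ∣ p)) := by
  rw [List.mem_filter, PySem.List.mem_pyRange_one]
  constructor
  · rintro ⟨⟨h2, hr⟩, hget⟩
    rw [PySem.List.pyGet?_of_nonneg _ (by omega : (0:Int) ≤ p)] at hget
    exact ⟨h2, by omega, (pvSieve_getD r p h2 (by omega)).mp hget⟩
  · rintro ⟨h2, hr, hnd⟩
    refine ⟨⟨h2, by omega⟩, ?_⟩
    rw [PySem.List.pyGet?_of_nonneg _ (by omega : (0:Int) ≤ p)]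
    exact (pvSieve_getD r p h2 hr).mpr hnd

-- B's per-element loop over a sorted list of values ≥ 2, with both early exits
theorem pvCheckPrimes_true_iff (n : Int) (l : List Int)
    (hall : ∀ p ∈ l, 2 ≤ p) (hsort : l.Pairwise (· < ·)) :
    pvCheckPrimes n l = true ↔ ∀ p ∈ l, p * p ≤ n → ¬ (p ∣ n) := by
  induction l with
  | nil => simp [pvCheckPrimes]
  | cons p ps ih =>
      have h2p : 2 ≤ p := hall p List.mem_cons_self
      rw [pvCheckPrimes]
      by_cases hlt : n < p * p
      · rw [if_pos hlt]
        refine iff_of_true rfl ?_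
        intro q hq hqq
        exfalso
        rcases List.mem_cons.mp hq with h | h
        · subst h; omega
        · have : p < q := (List.pairwise_cons.mp hsort).1 q h
          nlinarith
      · rw [if_neg hlt]
        by_cases hm : PySem.Int.mod n p == 0
        · rw [if_pos hm]
          refine iff_of_false (by simp) ?_
          intro h
          exact h p List.mem_cons_self (by omega)
            ((PySem.Int.mod_eq_zero_iff_dvd n p).mp (by simpa using hm))
        · rw [if_neg hm]
          rw [ih (fun q hq => hall q (List.mem_cons_of_mem _ hq)) (List.pairwise_cons.mp hsort).2]
          constructor
          · intro h q hq hqq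
            rcases List.mem_cons.mp hq with rfl | hmem
            · intro hdvd
              exact hm (by simpa using (PySem.Int.mod_eq_zero_iff_dvd _ _).mpr hdvd)
            · exact h q hmem hqq
          · intro h q hq hqq
            exact h q (List.mem_cons_of_mem _ hq) hqq

-- any n with a divisor d (2 ≤ d, d*d ≤ n) has a PRIME such divisor (via Nat.minFac)
theorem pvCompositeHasPrimeDiv (n : Int) (h2 : 2 ≤ n)
    (d : Int) (hd2 : 2 ≤ d) (hdd : d * d ≤ n) (hdvd : d ∣ n) :
    ∃ q : Int, 2 ≤ q ∧ q * q ≤ n ∧ q ∣ n ∧ (∀ e : Int, 2 ≤ e → e * e ≤ q → ¬ (e ∣ q)) := by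
  have hdn : d < n := by nlinarith
  have hcast : (n.toNat : Int) = n := Int.toNat_of_nonneg (by omega)
  have hdN : d.toNat ∣ n.toNat := by
    rw [← Int.natCast_dvd_natCast, hcast, Int.toNat_of_nonneg (by omega)]
    exact hdvd
  have hnp : ¬ (n.toNat).Prime := by
    intro hp
    rcases hp.eq_one_or_self_of_dvd d.toNat hdN with h | h <;> omega
  set q := (n.toNat).minFac with hq
  have hqp : q.Prime := Nat.minFac_prime (by omega)
  have hqd : q ∣ n.toNat := Nat.minFac_dvd n.toNat
  have hqq : q * q ≤ n.toNat := by
    have := Nat.minFac_sq_le_self (by omega : 0 < n.toNat) hnp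
    simpa [pow_two] using this
  refine ⟨(q : Int), by exact_mod_cast hqp.two_le, ?_, ?_, ?_⟩
  · rw [← hcast]; exact_mod_cast hqq
  · rw [← hcast]; exact_mod_cast hqd
  · intro e h2e hee hedvd
    have heq : e.toNat ∣ q := by
      rw [← Int.natCast_dvd_natCast, Int.toNat_of_nonneg (by omega : (0:Int) ≤ e)]
      exact hedvd
    rcases hqp.eq_one_or_self_of_dvd e.toNat heq with h | h
    · omega
    · have hq2 : 2 ≤ (q : Int) := by exact_mod_cast hqp.two_le
      have : (e : Int) = (q : Int) := by omega
      nlinarith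
  
-- A's for loop returns true iff no divisor k with j ≤ k < num (for enough fuel)
theorem pvIsPrimeLoopA_eq_true_iff (num : Int) (fuel : Nat) :
    ∀ j : Int, (num - j).toNat ≤ fuel →
      (pvIsPrimeLoopA num fuel j = true ↔ ∀ k : Int, j ≤ k → k < num → ¬ (k ∣ num)) := by
  induction fuel with
  | zero =>
      intro j hfuel
      rw [pvIsPrimeLoopA, if_neg (by omega)]
      simp only [true_iff]
      intro k hjk hk
      exfalso; omega
  | succ fuel ih =>
      intro j hfuel
      rw [pvIsPrimeLoopA]
      by_cases h : j < num
      · rw [if_pos h]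
        by_cases hm : PySem.Int.mod num j == 0
        · rw [if_pos hm]
          simp only [Bool.false_eq_true, false_iff]
          intro hall
          exact hall j (le_refl j) h ((PySem.Int.mod_eq_zero_iff_dvd num j).mp (by simpa using hm))
        · rw [if_neg hm]
          rw [ih (j + 1) (by omega)]
          constructor
          · intro hall k hjk hk
            rcases lt_or_eq_of_le hjk with hlt | heq
            · exact hall k (by omega) hk
            · subst heq
              intro hdvd
              exact hm (by simpa using (PySem.Int.mod_eq_zero_iff_dvd _ _).mpr hdvd)
          · intro hall k hjk hk
            exact hall k (by omega) hk
      · rw [if_neg h]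
        simp only [true_iff]
        intro k hjk hk
        exfalso; omega

-- trial division up to n-1 finds a divisor iff trial division up to sqrt(n) does
theorem pvDivisor_sqrt (n : Int) (hn : 2 ≤ n) :
    (∀ i : Int, 2 ≤ i → i < n → ¬ (i ∣ n)) ↔ (∀ i : Int, 2 ≤ i → i * i ≤ n → ¬ (i ∣ n)) := by
  constructor
  · intro hall i hi hii
    exact hall i hi (by nlinarith)
  · intro hsq i hi hlt hdvd
    rcases hdvd with ⟨k, hk⟩
    have hk2 : 2 ≤ k := by nlinarith
    by_cases hii : i * i ≤ n
    · exact hsq i hi hii ⟨k, hk⟩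
    · have hkk : k * k ≤ n := by nlinarith
      exact hsq k hk2 hkk ⟨i, by linarith [hk, mul_comm i k]⟩

-- A's loop (fuel n-2, start 2) decides the sqrt-bounded divisor test (for 2 ≤ n)
theorem pvLoopA_sqrt_iff (n : Int) (h2 : 2 ≤ n) :
    pvIsPrimeLoopA n (n - 2).toNat 2 = true ↔ ∀ i : Int, 2 ≤ i → i * i ≤ n → ¬ (i ∣ n) := by
  rw [pvIsPrimeLoopA_eq_true_iff n (n - 2).toNat 2 (by omega)]
  exact pvDivisor_sqrt n h2

-- ===== VERDICT (by name: the statement is the Claim_ definition above) =====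
theorem replace_primes_with_cubes_spec : Claim_equal_replace_primes_with_cubes := by
  intro nums _
  unfold Spec_replace_primes_with_cubes replace_primes_with_cubes replace_primes_with_cubes_alt
  cases hmax : PySem.List.max? nums (fun x => x) with
  | none =>
      rw [(PySem.List.max?_eq_none_iff nums _).mp hmax]
      rfl
  | some m =>
      simp only []
      refine (List.map_congr_left ?_).symm
      intro n hn
      have hnm : n ≤ m := PySem.List.max?_isMax hmax n hn
      by_cases h2 : 2 ≤ n
      · -- the sqrt loop result and its bracketing
        set r := pvISqrt m m.toNat 1 with hr
        obtain ⟨hr1, hrr, hrm⟩ := pvISqrt_spec m m.toNat 1 (by omega) (by omega) (by omega)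
        set primes := (PySem.List.pyRange 2 (r + 1) 1).filter
            (fun i => (PySem.List.pyGet? (pvSieve r) i).getD false) with hprimes
        have hall : ∀ p ∈ primes, 2 ≤ p := fun p hp => ((pvPrimes_mem r p).mp hp).1
        have hsort : primes.Pairwise (· < ·) :=
          List.Pairwise.sublist List.filter_sublist (PySem.List.pairwise_lt_pyRange_one 2 (r + 1))
        have hiff : pvIsPrimeA n = pvIsP primes n := by
          unfold pvIsPrimeA pvIsP
          rw [if_neg (show ¬ n ≤ 1 by omega), if_neg (show ¬ n < 2 by omega)]
          rw [Bool.eq_iff_iff, pvLoopA_sqrt_iff n h2,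
              pvCheckPrimes_true_iff n primes hall hsort]
          constructor
          · intro h p hp hpp
            exact h p (hall p hp) hpp
          · intro h d h2d hdd hdvd
            obtain ⟨q, h2q, hqq, hqd, hqnd⟩ := pvCompositeHasPrimeDiv n h2 d h2d hdd hdvd
            have hqr : q ≤ r := by nlinarith
            exact h q ((pvPrimes_mem r q).mpr ⟨h2q, hqr, hqnd⟩) hqq hqd
        rw [hiff]
      · have hA : pvIsPrimeA n = false := by
          unfold pvIsPrimeA; rw [if_pos (by omega)]
        have hB : ∀ ps, pvIsP ps n = false := by
          intro ps; unfold pvIsP; rw [if_pos (by omega)]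
        simp [hA, hB]
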